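-- pv_equiv track=rewrite | github.com/brambloemen/TecanGrowthCurves | tecan_streamlit.py | blank_match_type
-- ===== SOURCE A (Python) =====
-- def is_blank(strain: str | None) -> bool:
--     return isinstance(strain, str) and strain.strip().lower().startswith("blank")
--
-- def blank_match_type(layout: dict, medium: str | None,
--                      excluded_wells: set[str] | None = None) -> str:
--     """Return 'exact', 'fallback', or 'none' for the blank available for this medium."""
--     if medium is None:
--         return "none"
--
--     def has_blank(med: str) -> bool:
--         return any(
--             s is not None and is_blank(str(s))
--             and layout["media"].get(w) == med
--             and (not excluded_wells or w not in excluded_wells)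
--             for w, s in layout["strains"].items()
--         )
--
--     if has_blank(medium):
--         return "exact"
--     if "+" in medium:
--         base = medium.split("+")[0].strip()
--         if has_blank(base):
--             return "fallback"
--     return "none"
-- ===== SOURCE B (Python) =====
-- def is_blank(strain):
--     return isinstance(strain, str) and strain.strip().lower().startswith("blank")
--
-- def blank_match_type(layout, medium, excluded_wells=None):
--     """Return 'exact', 'fallback', or 'none' for the blank available for this medium."""
--     if medium is None:
--         return "none"
--     media = layout["media"]
--     base = medium.split("+")[0].strip() if "+" in medium else None
--     exact = False
--     fb = False
--     for w, s in layout["strains"].items():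
--         if s is None or not is_blank(str(s)):
--             continue
--         if excluded_wells and w in excluded_wells:
--             continue
--         m = media.get(w)
--         if m == medium:
--             exact = True
--         if m == base:
--             fb = True
--     if exact:
--         return "exact"
--     if base is not None and fb:
--         return "fallback"
--     return "none"
-- ===== Notes on version B (the rewrite author's own statement) =====
-- stated objective: alternative
-- what changed: B precomputes the fallback base once, then makes ONE loop over the wells maintaining two boolean accumulators (exact-blank seen, base-blank seen) and decides the answer from the flags at the end, instead of A's has_blank closure that performs a separate filtered any()-scan per candidate medium.
-- outside the precondition, e.g. on blank_match_type({'strains': {}}, 'M', None): A returns 'none', B raises KeyError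
import Mathlib
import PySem

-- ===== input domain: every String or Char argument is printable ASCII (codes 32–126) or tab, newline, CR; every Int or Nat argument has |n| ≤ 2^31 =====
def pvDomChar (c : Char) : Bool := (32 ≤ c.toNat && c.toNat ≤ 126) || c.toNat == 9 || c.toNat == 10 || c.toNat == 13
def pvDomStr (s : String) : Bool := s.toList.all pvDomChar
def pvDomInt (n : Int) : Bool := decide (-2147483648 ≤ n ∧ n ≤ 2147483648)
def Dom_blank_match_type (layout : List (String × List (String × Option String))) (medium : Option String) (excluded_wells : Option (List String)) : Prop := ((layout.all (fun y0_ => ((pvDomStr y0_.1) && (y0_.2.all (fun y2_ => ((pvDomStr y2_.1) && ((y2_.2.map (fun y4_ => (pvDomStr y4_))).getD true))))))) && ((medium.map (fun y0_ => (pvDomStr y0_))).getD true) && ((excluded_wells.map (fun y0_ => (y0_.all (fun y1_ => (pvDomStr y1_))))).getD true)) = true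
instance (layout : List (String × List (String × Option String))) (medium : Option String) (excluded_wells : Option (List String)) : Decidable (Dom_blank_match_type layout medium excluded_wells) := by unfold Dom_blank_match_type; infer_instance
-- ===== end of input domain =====

-- B precomputes the fallback base once and makes ONE pass over the wells maintaining two boolean
-- accumulators (exact seen / base seen), instead of A's has_blank closure scanning per candidate.

-- ===== PORT A =====
-- is_blank(str(s)) for a string s (isinstance is then always true)
def pyIsBlank (s : String) : Bool :=
  PySem.Str.startswith (PySem.Str.lower (PySem.Str.strip s)) "blank"

-- layout["<k>"]: outer dict lookup; [] is only reached outside Pre_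
def pvOuterGet (layout : List (String × List (String × Option String))) (k : String) : List (String × Option String) :=
  (PySem.Dict.mk layout).getD k []

-- layout["media"].get(w)  (default None; stored None and missing key both give none)
def pvMediaGet (media : List (String × Option String)) (w : String) : Option String :=
  (PySem.Dict.mk media).getD w none

-- (not excluded_wells or w not in excluded_wells)
def pvExclOK (excluded_wells : Option (List String)) (w : String) : Bool :=
  match excluded_wells with
  | none => true
  | some l => l.isEmpty || !(l.contains w)

-- the inner has_blank(med) closure of A
def pvHasBlank (strains media : List (String × Option String)) (excluded_wells : Option (List String)) (med : String) : Bool :=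
  strains.any (fun p =>
    match p.2 with
    | none => false
    | some s => pyIsBlank s && (pvMediaGet media p.1 == some med) && pvExclOK excluded_wells p.1)

def blank_match_type (layout : List (String × List (String × Option String))) (medium : Option String) (excluded_wells : Option (List String)) : String :=
  match medium with
  | none => "none"
  | some med =>
    let strains := pvOuterGet layout "strains"
    let media := pvOuterGet layout "media"
    if pvHasBlank strains media excluded_wells med then "exact"
    else if PySem.Str.isIn "+" med then
      let base := PySem.Str.strip (((PySem.Str.split? med "+").getD []).headD "")
      if pvHasBlank strains media excluded_wells base then "fallback" else "none"
    else "none"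

-- ===== PORT B =====
-- loop body of B: update the (exact seen, base seen) flags for one well
def pvStep (media : List (String × Option String)) (excluded_wells : Option (List String))
    (med : String) (base : Option String) (acc : Bool × Bool) (p : String × Option String) : Bool × Bool :=
  match p.2 with
  | none => acc
  | some s =>
    if pyIsBlank s && pvExclOK excluded_wells p.1 then
      let m := pvMediaGet media p.1
      (acc.1 || (m == some med), acc.2 || (m == base))
    else acc

def blank_match_type_alt (layout : List (String × List (String × Option String))) (medium : Option String) (excluded_wells : Option (List String)) : String :=
  match medium with
  | none => "none"
  | some med =>
    let media := pvOuterGet layout "media"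
    let base : Option String :=
      if PySem.Str.isIn "+" med then some (PySem.Str.strip (((PySem.Str.split? med "+").getD []).headD ""))
      else none
    let r := (pvOuterGet layout "strains").foldl (pvStep media excluded_wells med base) (false, false)
    if r.1 then "exact"
    else if base.isSome && r.2 then "fallback"
    else "none"

-- ===== PRECONDITION & SPEC =====
-- Pre_ excludes inputs (with medium not None) whose layout lacks a "strains" or "media" key:
-- there A raises KeyError, except that with "media" missing and no qualifying blank well A
-- still returns "none" (lazy .get inside the generator) while B's eager lookup raises KeyError.
def Pre_blank_match_type (layout : List (String × List (String × Option String))) (medium : Option String) (excluded_wells : Option (List String)) : Prop :=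
  medium = none ∨ ((PySem.Dict.mk layout).contains "strains" = true ∧ (PySem.Dict.mk layout).contains "media" = true)
instance (layout : List (String × List (String × Option String))) (medium : Option String) (excluded_wells : Option (List String)) : Decidable (Pre_blank_match_type layout medium excluded_wells) := by unfold Pre_blank_match_type; infer_instance

def pvWitness_blank_match_type : (List (String × List (String × Option String))) × Option String × Option (List String) :=
  ([("strains", [("A1", some "blank 1"), ("A2", some "x")]), ("media", [("A1", some "M")])], some "M", none)

def Spec_blank_match_type (layout : List (String × List (String × Option String))) (medium : Option String) (excluded_wells : Option (List String)) (out : String) : Prop := out = blank_match_type_alt layout medium excluded_wells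
instance (layout : List (String × List (String × Option String))) (medium : Option String) (excluded_wells : Option (List String)) (out : String) : Decidable (Spec_blank_match_type layout medium excluded_wells out) := by unfold Spec_blank_match_type; infer_instance

-- ===== CLAIM (what is proved, stated in full; the proofs are below) =====
def Claim_equal_blank_match_type : Prop := ∀ (layout : List (String × List (String × Option String))) (medium : Option String) (excluded_wells : Option (List String)), Dom_blank_match_type layout medium excluded_wells → Pre_blank_match_type layout medium excluded_wells → Spec_blank_match_type layout medium excluded_wells (blank_match_type layout medium excluded_wells)

-- ===== LEMMAS AND PROOFS =====
-- the any-scan B's flags accumulate, one per target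
def pvAnyMatch (strains media : List (String × Option String)) (excluded_wells : Option (List String)) (t : Option String) : Bool :=
  strains.any (fun p =>
    match p.2 with
    | none => false
    | some s => pyIsBlank s && pvExclOK excluded_wells p.1 && (pvMediaGet media p.1 == t))

theorem foldl_pvStep (media : List (String × Option String)) (excluded_wells : Option (List String))
    (med : String) (base : Option String) (strains : List (String × Option String)) (acc : Bool × Bool) :
    strains.foldl (pvStep media excluded_wells med base) acc
      = (acc.1 || pvAnyMatch strains media excluded_wells (some med),
         acc.2 || pvAnyMatch strains media excluded_wells base) := by
  induction strains generalizing acc with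
  | nil => simp [pvAnyMatch]
  | cons p tl ih =>
    rcases p with ⟨w, _ | s⟩
    · simp only [List.foldl_cons, pvStep, ih]
      simp [pvAnyMatch]
    · simp only [List.foldl_cons, pvStep]
      by_cases h : (pyIsBlank s && pvExclOK excluded_wells w) = true
      · rw [Bool.and_eq_true] at h
        simp [ih, pvAnyMatch, h.1, h.2, Bool.or_assoc]
      · simp only [h, ih]
        simp only [Bool.not_eq_true] at h
        simp [pvAnyMatch, h]

theorem hasBlank_eq_anyMatch (strains media : List (String × Option String))
    (excluded_wells : Option (List String)) (med : String) :
    pvHasBlank strains media excluded_wells med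
      = pvAnyMatch strains media excluded_wells (some med) := by
  unfold pvHasBlank pvAnyMatch
  induction strains with
  | nil => simp
  | cons p tl ih =>
    rcases p with ⟨w, _ | s⟩
    · simpa using ih
    · simp only [List.any_cons] at ih ⊢
      rw [ih, Bool.and_assoc, Bool.and_assoc, Bool.and_comm (pvMediaGet media w == some med)]

theorem blank_match_type_spec : Claim_equal_blank_match_type := by
  intro layout medium excluded_wells _ _
  unfold Spec_blank_match_type blank_match_type blank_match_type_alt
  cases medium with
  | none => rfl
  | some med =>
    simp only [foldl_pvStep, hasBlank_eq_anyMatch, Bool.false_or]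
    by_cases hp : PySem.Chars.isIn ['+'] med.toList = true
    · simp [PySem.Str.isIn, hp]
    · simp [PySem.Str.isIn, hp]
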